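-- pv_equiv track=rewrite | github.com/tzuyun45015/Algorithm | Hackerrank/Component_in_Graph.py | componentsInGraph
-- ===== SOURCE A (Python) =====
-- def componentsInGraph(gb):
--     # Write your code here
--     n = len(gb) * 2
--     adj = { i:[] for i in range(n+1)}
--     for n1, n2 in gb:
--         adj[n1].append(n2)
--         adj[n2].append(n1)
--
--
--     def dfs(i):
--         visited[i] = True
--         count = 1
--         for j in adj[i]:
--             if visited[j] == False:
--                 count += dfs(j)
--         return count
--
--     visited = [False] * (n+1)
--     smallest = float('inf')
--     biggest = 0
--
--     for i in range(1,n+1):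
--         if visited[i] == False :
--             count = dfs(i)
--             if count >= 2:
--                 smallest = min(smallest, count)
--             biggest = max(biggest, count)
--
--     if smallest == float('inf'):
--         smallest = biggest
--
--     return [smallest, biggest]
-- ===== SOURCE B (Python) =====
-- def componentsInGraph(gb):
--     n = len(gb) * 2
--     adj = {i: [] for i in range(n + 1)}
--     for a, b in gb:
--         adj[a].append(b)
--         adj[b].append(a)
--     seen = set()
--     sizes = []
--     for i in range(1, n + 1):
--         if i in seen:
--             continue
--         seen.add(i)
--         stack = [i]
--         size = 0
--         while stack:
--             x = stack.pop()
--             size += 1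
--             for y in adj[x]:
--                 if y not in seen:
--                     seen.add(y)
--                     stack.append(y)
--         sizes.append(size)
--     biggest = max(sizes, default=0)
--     smallest = min((s for s in sizes if s >= 2), default=biggest)
--     return [smallest, biggest]
-- ===== Notes on version B (the rewrite author's own statement) =====
-- stated objective: alternative
-- what changed: Replaces the recursive DFS with marking-on-visit and online inf-sentinel min/max registers by an iterative worklist traversal (explicit stack, marking-on-push into a seen set) that collects all component sizes in a list and aggregates smallest/biggest at the end with min/max with defaults.
import Mathlib
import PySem

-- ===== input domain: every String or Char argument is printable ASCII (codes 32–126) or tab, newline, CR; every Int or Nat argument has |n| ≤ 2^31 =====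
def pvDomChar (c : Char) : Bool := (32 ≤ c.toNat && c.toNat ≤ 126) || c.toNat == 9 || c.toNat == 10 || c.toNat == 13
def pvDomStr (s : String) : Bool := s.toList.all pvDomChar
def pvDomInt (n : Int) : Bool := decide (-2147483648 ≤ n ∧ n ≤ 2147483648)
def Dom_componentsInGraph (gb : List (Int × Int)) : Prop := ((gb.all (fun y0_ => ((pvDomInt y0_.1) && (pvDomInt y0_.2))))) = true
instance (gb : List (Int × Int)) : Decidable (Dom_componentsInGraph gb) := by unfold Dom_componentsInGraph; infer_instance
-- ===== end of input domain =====

-- B replaces A's recursive DFS with an explicit-stack worklist that marks on push and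
-- aggregates all component sizes at the end (objective: alternative; same asymptotic cost).

-- ===== PORT A =====

-- smallest = min(smallest, count) where smallest may still be float('inf'), encoded none
def pvMinUpd (o : Option Int) (c : Int) : Option Int :=
  match o with
  | none => some c
  | some m => some (min m c)

-- adj = {i: [] for i in range(n+1)}; for n1, n2 in gb: adj[n1].append(n2); adj[n2].append(n1)
-- (Dict.modify k [] f sets adj[k] = f(adj.get(k, [])); under Pre_ every endpoint key is
-- present in the comprehension-built dict, so this is exactly Python's append)
def pvAdjA (gb : List (Int × Int)) : PySem.Dict Int (List Int) :=
  let n : Int := gb.length * 2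
  let init : PySem.Dict Int (List Int) :=
    (PySem.List.pyRange 0 (n + 1) 1).foldl (fun d i => d.insert i []) PySem.Dict.empty
  gb.foldl (fun d p =>
    (d.modify p.1 [] (fun l => l ++ [p.2])).modify p.2 [] (fun l => l ++ [p.1])) init

-- def dfs(i): visited[i] = True; count = 1; for j in adj[i]: if visited[j] == False: count += dfs(j); return count
-- (fuel is a totality guard only; the proofs show gb.length*2 + 2 is never exhausted under Pre_)
def pvDfsA (adj : PySem.Dict Int (List Int)) : Nat → List Bool → Int → Int × List Bool
  | 0, v, _ => (0, v)
  | fuel + 1, v, i =>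
    (adj.getD i []).foldl
      (fun acc j =>
        if PySem.List.pyGetD acc.2 j false = false then
          let r := pvDfsA adj fuel acc.2 j
          (acc.1 + r.1, r.2)
        else acc)
      (1, PySem.List.pySetD v i true)

-- smallest = float('inf') is encoded as 'none' (exact: min(inf, c) = c, and the final
-- 'smallest == inf' test is 'none'); state = (visited, smallest, biggest)
def componentsInGraph (gb : List (Int × Int)) : List Int :=
  let n : Int := gb.length * 2
  let adj := pvAdjA gb
  let visited : List Bool := List.replicate (n + 1).toNat false
  let st := (PySem.List.pyRange 1 (n + 1) 1).foldl
    (fun (s : List Bool × Option Int × Int) i =>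
      if PySem.List.pyGetD s.1 i false = false then
        let r := pvDfsA adj (n.toNat + 2) s.1 i
        let sm := if r.1 ≥ 2 then pvMinUpd s.2.1 r.1 else s.2.1
        (r.2, sm, max s.2.2 r.1)
      else s)
    (visited, none, 0)
  [st.2.1.getD st.2.2, st.2.2]

-- ===== PORT B =====

-- adj = {i: [] for i in range(n+1)}; for a, b in gb: adj[a].append(b); adj[b].append(a)
-- (same comprehension-keyed dict as A's: an endpoint outside 0..n is a KeyError in B too)
def pvAdjB (gb : List (Int × Int)) : PySem.Dict Int (List Int) :=
  let n : Int := gb.length * 2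
  let init : PySem.Dict Int (List Int) :=
    (PySem.List.pyRange 0 (n + 1) 1).foldl (fun d i => d.insert i []) PySem.Dict.empty
  gb.foldl (fun d p =>
    (d.modify p.1 [] (fun l => l ++ [p.2])).modify p.2 [] (fun l => l ++ [p.1])) init

-- while stack: x = stack.pop(); size += 1;
--   for y in adj.get(x, []): if y not in seen: seen.add(y); stack.append(y)
-- (list.append/pop at the tail is the cons/head stack here: same LIFO order;
-- fuel is a totality guard only, proved sufficient under Pre_)
def pvLoopB (adj : PySem.Dict Int (List Int)) :
    Nat → PySem.Set Int → List Int → Int → Int × PySem.Set Int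
  | 0, seen, _, size => (size, seen)
  | fuel + 1, seen, stack, size =>
    match stack with
    | [] => (size, seen)
    | x :: rest =>
      let st := (adj.getD x []).foldl
        (fun (p : PySem.Set Int × List Int) y =>
          if PySem.Set.contains p.1 y then p else (PySem.Set.add p.1 y, y :: p.2))
        (seen, rest)
      pvLoopB adj fuel st.1 st.2 (size + 1)

def componentsInGraph_alt (gb : List (Int × Int)) : List Int :=
  let n : Int := gb.length * 2
  let adj := pvAdjB gb
  let st := (PySem.List.pyRange 1 (n + 1) 1).foldl
    (fun (s : PySem.Set Int × List Int) i =>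
      if PySem.Set.contains s.1 i then s
      else
        let r := pvLoopB adj (2 * n.toNat + 4) (PySem.Set.add s.1 i) [i] 0
        (r.2, s.2 ++ [r.1]))
    (PySem.Set.empty, [])
  let biggest := PySem.List.maxD st.2 (fun x => x) 0
  let smallest := PySem.List.minD (st.2.filter (fun s => 2 ≤ s)) (fun x => x) biggest
  [smallest, biggest]

-- ===== PRECONDITION & SPEC =====

-- Pre_ excludes exactly the inputs on which A raises KeyError: an edge endpoint
-- outside the node range 0..2*len(gb) that A's adjacency dict is keyed by.
def Pre_componentsInGraph (gb : List (Int × Int)) : Prop :=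
  ∀ p ∈ gb, 0 ≤ p.1 ∧ p.1 ≤ 2 * gb.length ∧ 0 ≤ p.2 ∧ p.2 ≤ 2 * gb.length
instance (gb : List (Int × Int)) : Decidable (Pre_componentsInGraph gb) := by
  unfold Pre_componentsInGraph; infer_instance

def pvWitness_componentsInGraph : (List (Int × Int)) := [(1, 0), (2, 1), (0, 2), (1, 1), (2, 0), (0, 0)]

def Spec_componentsInGraph (gb : List (Int × Int)) (out : List Int) : Prop := out = componentsInGraph_alt gb
instance (gb : List (Int × Int)) (out : List Int) : Decidable (Spec_componentsInGraph gb out) := by unfold Spec_componentsInGraph; infer_instance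

-- ===== CLAIM (what is proved, stated in full; the proofs are below) =====
def Claim_equal_componentsInGraph : Prop := ∀ (gb : List (Int × Int)), Dom_componentsInGraph gb → Pre_componentsInGraph gb → Spec_componentsInGraph gb (componentsInGraph gb)

-- ===== LEMMAS AND PROOFS =====

-- The undirected edge relation of gb, and reachability along it.
def pvE (gb : List (Int × Int)) (x y : Int) : Prop := (x, y) ∈ gb ∨ (y, x) ∈ gb
def pvReach (gb : List (Int × Int)) : Int → Int → Prop := Relation.ReflTransGen (pvE gb)

-- the set of indices marked true in A's visited list
def pvM (v : List Bool) : Finset ℤ :=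
  ((Finset.range v.length).filter (fun k => v.getD k false = true)).image (fun k => ((k : Nat) : Int))

-- the set of elements of B's seen set
def pvSeen (s : PySem.Set Int) : Finset ℤ := s.toFinset

-- a set closed under the edge relation (a union of whole components)
def pvClosed (gb : List (Int × Int)) (S : Finset ℤ) : Prop :=
  ∀ x ∈ S, ∀ y, pvE gb x y → y ∈ S

lemma pvE_range {gb : List (Int × Int)} (hpre : Pre_componentsInGraph gb) {x y : Int}
    (h : pvE gb x y) : (0 ≤ x ∧ x ≤ 2 * gb.length) ∧ (0 ≤ y ∧ y ≤ 2 * gb.length) := by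
  rcases h with h | h <;> rcases hpre _ h with ⟨a, b, c, d⟩ <;> exact ⟨⟨‹_›, ‹_›⟩, ⟨‹_›, ‹_›⟩⟩


-- one build step of either adjacency dict adds exactly the two directions of the edge p
lemma pvStepA_mem (d : PySem.Dict Int (List Int)) (p : Int × Int) (x y : Int) :
    y ∈ ((d.modify p.1 [] (fun l => l ++ [p.2])).modify p.2 [] (fun l => l ++ [p.1])).getD x []
      ↔ y ∈ d.getD x [] ∨ (x = p.1 ∧ y = p.2) ∨ (x = p.2 ∧ y = p.1) := by
  obtain ⟨a, b⟩ := p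
  simp only [PySem.Dict.modify, PySem.Dict.getD_insert]
  rcases eq_or_ne x a with rfl | h1
  · rcases eq_or_ne x b with rfl | h2
    · simp [List.mem_append]
    · simp [List.mem_append, h2]
  · rcases eq_or_ne x b with rfl | h2
    · simp [List.mem_append, h1]
    · simp [h1, h2]

lemma pvAdjA_fold_mem (gb : List (Int × Int)) (d : PySem.Dict Int (List Int)) (x y : Int) :
    y ∈ (gb.foldl (fun d p =>
          (d.modify p.1 [] (fun l => l ++ [p.2])).modify p.2 [] (fun l => l ++ [p.1])) d).getD x []
      ↔ y ∈ d.getD x [] ∨ pvE gb x y := by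
  induction gb generalizing d with
  | nil => simp [pvE]
  | cons p gb ih =>
    rw [List.foldl_cons, ih, pvStepA_mem]
    simp only [pvE, List.mem_cons, Prod.ext_iff]
    tauto

-- the comprehension-built initial dict has only empty values
lemma pvInitA_getD (ks : List Int) (d : PySem.Dict Int (List Int))
    (h : ∀ x, d.getD x [] = []) (x : Int) :
    (ks.foldl (fun d i => d.insert i ([] : List Int)) d).getD x [] = [] := by
  induction ks generalizing d with
  | nil => exact h x
  | cons k ks ih =>
    rw [List.foldl_cons]
    exact ih _ (fun z => by rw [PySem.Dict.getD_insert]; split <;> simp [h])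

-- membership in the adjacency lists is exactly the edge relation (port A's dict)
lemma mem_pvAdjA {gb : List (Int × Int)} {x y : Int} :
    y ∈ (pvAdjA gb).getD x [] ↔ pvE gb x y := by
  unfold pvAdjA
  rw [pvAdjA_fold_mem, pvInitA_getD _ _ (fun z => PySem.Dict.getD_empty z [])]
  simp

-- membership in the adjacency lists is exactly the edge relation (port B's dict)
lemma mem_pvAdjB {gb : List (Int × Int)} {x y : Int} :
    y ∈ (pvAdjB gb).getD x [] ↔ pvE gb x y := by
  unfold pvAdjB
  rw [pvAdjA_fold_mem, pvInitA_getD _ _ (fun z => PySem.Dict.getD_empty z [])]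
  simp

-- saturation sets are unique: two supersets of S ∪ {i} that are edge-closed and whose
-- new elements are all reachable from i coincide
lemma pvUniq {gb : List (Int × Int)} {S T₁ T₂ : Finset ℤ} {i : Int}
    (h1S : S ⊆ T₁) (h1i : i ∈ T₁) (h1c : ∀ x ∈ T₁, ∀ y, pvE gb x y → y ∈ T₁)
    (h1s : ∀ x ∈ T₁, x ∈ S ∨ pvReach gb i x)
    (h2S : S ⊆ T₂) (h2i : i ∈ T₂) (h2c : ∀ x ∈ T₂, ∀ y, pvE gb x y → y ∈ T₂)
    (h2s : ∀ x ∈ T₂, x ∈ S ∨ pvReach gb i x) : T₁ = T₂ := by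
  have key : ∀ (U V : Finset ℤ), S ⊆ V → i ∈ V → (∀ x ∈ V, ∀ y, pvE gb x y → y ∈ V) →
      (∀ x ∈ U, x ∈ S ∨ pvReach gb i x) → U ⊆ V := by
    intro U V hSV hiV hcV hsU x hx
    rcases hsU x hx with h | h
    · exact hSV h
    · clear hx
      induction h with
      | refl => exact hiV
      | tail _ hbc ih => exact hcV _ ih _ hbc
  exact Finset.Subset.antisymm (key T₁ T₂ h2S h2i h2c h1s) (key T₂ T₁ h1S h1i h1c h2s)

-- ===== facts about pvM =====

lemma mem_pvM {v : List Bool} {i : Int} :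
    i ∈ pvM v ↔ 0 ≤ i ∧ i.toNat < v.length ∧ v.getD i.toNat false = true := by
  unfold pvM
  simp only [Finset.mem_image, Finset.mem_filter, Finset.mem_range]
  constructor
  · rintro ⟨k, ⟨hk, hv⟩, rfl⟩
    simpa using ⟨hk, hv⟩
  · rintro ⟨h0, hl, hv⟩
    exact ⟨i.toNat, ⟨hl, hv⟩, Int.toNat_of_nonneg h0⟩

lemma pvM_set {v : List Bool} {n : Nat} (h : n < v.length) :
    pvM (v.set n true) = insert (n : ℤ) (pvM v) := by
  have hget : ∀ k : Nat, (v.set n true).getD k false = if k = n then true else v.getD k false := by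
    intro k
    rcases eq_or_ne k n with rfl | hkn
    · simp [List.getD_eq_getElem?_getD, h]
    · simp [List.getD_eq_getElem?_getD, Ne.symm hkn, hkn]
  ext j
  simp only [mem_pvM, Finset.mem_insert, List.length_set, hget]
  constructor
  · rintro ⟨h0, hl, hv⟩
    rcases eq_or_ne j.toNat n with he | hne
    · left; omega
    · right; rw [if_neg hne] at hv; exact ⟨h0, hl, hv⟩
  · rintro (rfl | ⟨h0, hl, hv⟩)
    · simp [h]
    · refine ⟨h0, hl, ?_⟩
      rcases eq_or_ne j.toNat n with he | hne
      · simp [he]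
      · rw [if_neg hne]; exact hv

lemma pvM_card_lt {v : List Bool} {i : Int} (h0 : 0 ≤ i) (hl : i.toNat < v.length)
    (hm : i ∉ pvM v) : (pvM v).card < v.length := by
  have hsub : insert i (pvM v) ⊆ (Finset.range v.length).image (fun k => ((k : Nat) : Int)) := by
    intro x hx
    rcases Finset.mem_insert.1 hx with rfl | hx
    · exact Finset.mem_image.2 ⟨x.toNat, Finset.mem_range.2 hl, Int.toNat_of_nonneg h0⟩
    · rcases mem_pvM.1 hx with ⟨hx0, hxl, _⟩
      exact Finset.mem_image.2 ⟨x.toNat, Finset.mem_range.2 hxl, Int.toNat_of_nonneg hx0⟩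
  have := Finset.card_le_card hsub
  rw [Finset.card_insert_of_notMem hm,
      Finset.card_image_of_injective _ (fun a b => by omega), Finset.card_range] at this
  omega

lemma pvM_replicate (k : Nat) : pvM (List.replicate k false) = ∅ := by
  ext j
  simp [mem_pvM, List.getD_eq_getElem?_getD]

lemma pvGetD_false_iff {v : List Bool} {j : Int} (h0 : 0 ≤ j) (hl : j.toNat < v.length) :
    (PySem.List.pyGetD v j false = false) ↔ j ∉ pvM v := by
  rw [PySem.List.pyGetD_eq_getElem v false h0 (by omega)]
  simp only [mem_pvM, h0, true_and]
  rw [List.getD_eq_getElem?_getD, List.getElem?_eq_getElem hl]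
  simp [hl]

lemma mem_pvSeen {s : PySem.Set Int} {j : Int} : j ∈ pvSeen s ↔ j ∈ s := List.mem_toFinset

lemma pvSeen_add (s : PySem.Set Int) (y : Int) :
    pvSeen (PySem.Set.add s y) = insert y (pvSeen s) := by
  rw [PySem.Set.add_eq_ite]
  split
  · ext z; simp only [Finset.mem_insert, mem_pvSeen]; constructor
    · intro h; right; exact h
    · rintro (rfl | h) <;> [skip; exact h]; assumption
  · ext z; simp [pvSeen, List.mem_toFinset]

lemma pvSeen_card_le {s : PySem.Set Int} {m : Int} (hm : 0 ≤ m)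
    (hrg : ∀ x ∈ s, 0 ≤ x ∧ x ≤ m) : ((pvSeen s).card : Int) ≤ m + 1 := by
  have hsub : pvSeen s ⊆ Finset.Icc (0 : ℤ) m := by
    intro x hx
    rcases hrg x (mem_pvSeen.1 hx) with ⟨h1, h2⟩
    exact Finset.mem_Icc.2 ⟨h1, h2⟩
  have := Finset.card_le_card hsub
  rw [Int.card_Icc] at this
  omega

-- ===== the DFS of port A computes a saturation set =====

structure PvSat (gb : List (Int × Int)) (S T : Finset ℤ) (i : Int) (c : Int) : Prop where
  mono : S ⊆ T
  self : i ∈ T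
  sound : ∀ x ∈ T, x ∈ S ∨ pvReach gb i x
  closednew : ∀ x ∈ T, x ∉ S → ∀ y, pvE gb x y → y ∈ T
  count : c = (T.card : Int) - S.card

lemma pvDfsA_spec {gb : List (Int × Int)} (hpre : Pre_componentsInGraph gb) :
    ∀ (fuel : Nat) (v : List Bool) (i : Int),
      v.length = (2 * gb.length + 1) → 0 ≤ i → i.toNat < v.length → i ∉ pvM v →
      v.length ≤ fuel + (pvM v).card →
      (pvDfsA (pvAdjA gb) fuel v i).2.length = v.length ∧
      PvSat gb (pvM v) (pvM (pvDfsA (pvAdjA gb) fuel v i).2) i (pvDfsA (pvAdjA gb) fuel v i).1 := by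
  intro fuel
  induction fuel with
  | zero =>
    intro v i hlen h0 hl hm hfuel
    exact absurd hfuel (by have := pvM_card_lt h0 hl hm; omega)
  | succ fuel ih =>
    intro v i hlen h0 hl hm hfuel
    have hv1 : PySem.List.pySetD v i true = v.set i.toNat true :=
      PySem.List.pySetD_of_nonneg v true h0
    have hM1 : pvM (PySem.List.pySetD v i true) = insert i (pvM v) := by
      rw [hv1, pvM_set hl, Int.toNat_of_nonneg h0]
    have hlen1 : (PySem.List.pySetD v i true).length = v.length := by
      rw [hv1, List.length_set]
    -- the inner for-loop invariant, for any prefix-processed state (c, w)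
    have inner : ∀ (L : List Int), (∀ j ∈ L, pvE gb i j) → ∀ (c : Int) (w : List Bool),
        w.length = v.length →
        insert i (pvM v) ⊆ pvM w →
        (∀ x ∈ pvM w, x ∈ pvM v ∨ pvReach gb i x) →
        (∀ x ∈ pvM w, x ∉ insert i (pvM v) → ∀ y, pvE gb x y → y ∈ pvM w) →
        c = ((pvM w).card : Int) - (pvM v).card →
        (L.foldl (fun acc j =>
            if PySem.List.pyGetD acc.2 j false = false then
              let r := pvDfsA (pvAdjA gb) fuel acc.2 j
              (acc.1 + r.1, r.2)
            else acc) (c, w)).2.length = v.length ∧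
        pvM w ⊆ pvM (L.foldl (fun acc j =>
            if PySem.List.pyGetD acc.2 j false = false then
              let r := pvDfsA (pvAdjA gb) fuel acc.2 j
              (acc.1 + r.1, r.2)
            else acc) (c, w)).2 ∧
        (∀ x ∈ pvM (L.foldl (fun acc j =>
            if PySem.List.pyGetD acc.2 j false = false then
              let r := pvDfsA (pvAdjA gb) fuel acc.2 j
              (acc.1 + r.1, r.2)
            else acc) (c, w)).2, x ∈ pvM v ∨ pvReach gb i x) ∧
        (∀ x ∈ pvM (L.foldl (fun acc j =>
            if PySem.List.pyGetD acc.2 j false = false then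
              let r := pvDfsA (pvAdjA gb) fuel acc.2 j
              (acc.1 + r.1, r.2)
            else acc) (c, w)).2, x ∉ insert i (pvM v) → ∀ y, pvE gb x y →
              y ∈ pvM (L.foldl (fun acc j =>
                if PySem.List.pyGetD acc.2 j false = false then
                  let r := pvDfsA (pvAdjA gb) fuel acc.2 j
                  (acc.1 + r.1, r.2)
                else acc) (c, w)).2) ∧
        (L.foldl (fun acc j =>
            if PySem.List.pyGetD acc.2 j false = false then
              let r := pvDfsA (pvAdjA gb) fuel acc.2 j
              (acc.1 + r.1, r.2)
            else acc) (c, w)).1 = ((pvM (L.foldl (fun acc j =>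
            if PySem.List.pyGetD acc.2 j false = false then
              let r := pvDfsA (pvAdjA gb) fuel acc.2 j
              (acc.1 + r.1, r.2)
            else acc) (c, w)).2).card : Int) - (pvM v).card ∧
        (∀ j ∈ L, j ∈ pvM (L.foldl (fun acc j =>
            if PySem.List.pyGetD acc.2 j false = false then
              let r := pvDfsA (pvAdjA gb) fuel acc.2 j
              (acc.1 + r.1, r.2)
            else acc) (c, w)).2) := by
      intro L
      induction L with
      | nil =>
        intro hL c w hwlen hmono hsound hclo hcnt
        exact ⟨hwlen, Finset.Subset.refl _, hsound, hclo, hcnt, by simp⟩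
      | cons j L ihL =>
        intro hL c w hwlen hmono hsound hclo hcnt
        have hij : pvE gb i j := hL j (List.mem_cons_self)
        have hjr : 0 ≤ j ∧ j ≤ 2 * (gb.length : Int) := (pvE_range hpre hij).2
        have hjl : j.toNat < w.length := by omega
        rw [List.foldl_cons]
        by_cases hjv : PySem.List.pyGetD w j false = false
        · -- unvisited: recursive call
          have hjm : j ∉ pvM w := (pvGetD_false_iff hjr.1 hjl).1 hjv
          have hcard : (pvM v).card < (pvM w).card := by
            have h1 : insert i (pvM v) ⊆ pvM w := hmono
            have h2 : (insert i (pvM v)).card ≤ (pvM w).card := Finset.card_le_card h1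
            rw [Finset.card_insert_of_notMem hm] at h2
            omega
          obtain ⟨rlen, rsat⟩ := ih w j (by omega) hjr.1 hjl hjm (by omega)
          set r := pvDfsA (pvAdjA gb) fuel w j with hr
          obtain ⟨IH1, IH2, IH3, IH4, IH5, IH6⟩ := ihL (fun z hz => hL z (List.mem_cons_of_mem _ hz))
            (c + r.1) r.2 (by omega)
            (hmono.trans rsat.mono)
            (fun x hx => by
              rcases rsat.sound x hx with h | h
              · exact hsound x h
              · exact Or.inr (Relation.ReflTransGen.head hij h))
            (fun x hx hxn y hy => by
              by_cases hxw : x ∈ pvM w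
              · exact rsat.mono (hclo x hxw hxn y hy)
              · exact rsat.closednew x hx hxw y hy)
            (by have := rsat.count; omega)
          simp only [hjv, if_pos]
          refine ⟨IH1, rsat.mono.trans IH2, IH3, IH4, IH5, ?_⟩
          intro z hz
          rcases List.mem_cons.1 hz with rfl | hz
          · exact IH2 rsat.self
          · exact IH6 z hz
        · -- already visited
          have hjm : j ∈ pvM w := by
            by_contra hc
            exact hjv ((pvGetD_false_iff hjr.1 hjl).2 hc)
          obtain ⟨IH1, IH2, IH3, IH4, IH5, IH6⟩ := ihL (fun z hz => hL z (List.mem_cons_of_mem _ hz))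
            c w hwlen hmono hsound hclo hcnt
          simp only [hjv]
          refine ⟨IH1, IH2, IH3, IH4, IH5, ?_⟩
          intro z hz
          rcases List.mem_cons.1 hz with rfl | hz
          · exact IH2 hjm
          · exact IH6 z hz
    have hLadj : ∀ j ∈ (pvAdjA gb).getD i [], pvE gb i j := fun j hj => mem_pvAdjA.1 hj
    obtain ⟨F1, F2, F3, F4, F5, F6⟩ := inner ((pvAdjA gb).getD i []) hLadj 1
      (PySem.List.pySetD v i true) hlen1
      (by rw [hM1])
      (by
        intro x hx
        rw [hM1] at hx
        rcases Finset.mem_insert.1 hx with rfl | hx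
        · exact Or.inr Relation.ReflTransGen.refl
        · exact Or.inl hx)
      (by intro x hx hxn; rw [hM1] at hx; exact absurd hx hxn)
      (by rw [hM1, Finset.card_insert_of_notMem hm]; push_cast; ring)
    refine ⟨F1, ?_⟩
    simp only [pvDfsA]
    constructor
    · exact (Finset.subset_insert _ _).trans (by rw [← hM1]; exact F2)
    · exact F2 (by rw [hM1]; exact Finset.mem_insert_self _ _)
    · exact F3
    · intro x hx hxn y hy
      rcases eq_or_ne x i with rfl | hxi
      · exact F6 y (mem_pvAdjA.2 hy)
      · exact F4 x hx (by simp [hxn, hxi]) y hy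
    · exact F5
  

-- ===== the worklist loop of port B computes a saturation set =====

-- one neighbour-scan step of B's loop
def pvPush (p : PySem.Set Int × List Int) (y : Int) : PySem.Set Int × List Int :=
  if PySem.Set.contains p.1 y then p else (PySem.Set.add p.1 y, y :: p.2)

-- the neighbour for-loop of B preserves the worklist invariants and marks all of L
lemma pvLoopB_fold {gb : List (Int × Int)} (hpre : Pre_componentsInGraph gb)
    {i x : Int} {S : Finset ℤ} (hrx : pvReach gb i x) :
    ∀ (L : List Int), (∀ y ∈ L, pvE gb x y) → ∀ (sn : PySem.Set Int) (stk : List Int),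
    sn.Nodup → (∀ z ∈ sn, 0 ≤ z ∧ z ≤ 2 * (gb.length : Int)) → S ⊆ pvSeen sn →
    (∀ z ∈ stk, z ∈ pvSeen sn ∧ z ∉ S ∧ pvReach gb i z) →
    (∀ z ∈ pvSeen sn, z ∈ S ∨ pvReach gb i z) →
    (∀ z ∈ pvSeen sn, z ∉ S → z ∉ stk → z ≠ x → ∀ y, pvE gb z y → y ∈ pvSeen sn) →
    (L.foldl pvPush (sn, stk)).1.Nodup ∧
    (∀ z ∈ (L.foldl pvPush (sn, stk)).1, 0 ≤ z ∧ z ≤ 2 * (gb.length : Int)) ∧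
    pvSeen sn ⊆ pvSeen (L.foldl pvPush (sn, stk)).1 ∧
    (∀ z ∈ (L.foldl pvPush (sn, stk)).2, z ∈ pvSeen (L.foldl pvPush (sn, stk)).1 ∧ z ∉ S ∧ pvReach gb i z) ∧
    (∀ z ∈ pvSeen (L.foldl pvPush (sn, stk)).1, z ∈ S ∨ pvReach gb i z) ∧
    (∀ z ∈ pvSeen (L.foldl pvPush (sn, stk)).1, z ∉ S → z ∉ (L.foldl pvPush (sn, stk)).2 → z ≠ x →
       ∀ y, pvE gb z y → y ∈ pvSeen (L.foldl pvPush (sn, stk)).1) ∧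
    ((pvSeen (L.foldl pvPush (sn, stk)).1).card : Int) - ((L.foldl pvPush (sn, stk)).2.length : Int)
      = ((pvSeen sn).card : Int) - (stk.length : Int) ∧
    (∀ y ∈ L, y ∈ pvSeen (L.foldl pvPush (sn, stk)).1) := by
  intro L
  induction L with
  | nil =>
    intro hL sn stk hnd hrg hS hstk hsound hclo
    exact ⟨hnd, hrg, Finset.Subset.refl _, hstk, hsound,
      fun z hz h1 h2 h3 => hclo z hz h1 h2 h3, rfl, by simp⟩
  | cons y L ihL =>
    intro hL sn stk hnd hrg hS hstk hsound hclo
    have hxy : pvE gb x y := hL y List.mem_cons_self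
    have hyr : 0 ≤ y ∧ y ≤ 2 * (gb.length : Int) := (pvE_range hpre hxy).2
    rw [List.foldl_cons]
    by_cases hcy : PySem.Set.contains sn y = true
    · have hstep : pvPush (sn, stk) y = (sn, stk) := by unfold pvPush; rw [if_pos hcy]
      rw [hstep]
      obtain ⟨I1, I2, I3, I4, I5, I6, I7, I8⟩ :=
        ihL (fun z hz => hL z (List.mem_cons_of_mem _ hz)) sn stk hnd hrg hS hstk hsound hclo
      refine ⟨I1, I2, I3, I4, I5, I6, I7, ?_⟩
      intro z hz
      rcases List.mem_cons.1 hz with rfl | hz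
      · exact I3 (mem_pvSeen.2 ((PySem.Set.contains_iff _ _).1 hcy))
      · exact I8 z hz
    · have hyn : y ∉ sn := fun hmem => hcy ((PySem.Set.contains_iff _ _).2 hmem)
      have hynS : y ∉ pvSeen sn := fun hmem => hyn (mem_pvSeen.1 hmem)
      have hstep : pvPush (sn, stk) y = (PySem.Set.add sn y, y :: stk) := by
        unfold pvPush; rw [if_neg hcy]
      rw [hstep]
      have hseen' : pvSeen (PySem.Set.add sn y) = insert y (pvSeen sn) := pvSeen_add sn y
      obtain ⟨I1, I2, I3, I4, I5, I6, I7, I8⟩ :=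
        ihL (fun z hz => hL z (List.mem_cons_of_mem _ hz)) (PySem.Set.add sn y) (y :: stk)
          (PySem.Set.nodup_add sn y hnd)
          (fun z hz => by
            rcases (PySem.Set.mem_add sn y z).1 hz with hz | rfl
            · exact hrg z hz
            · exact hyr)
          (hS.trans (by rw [hseen']; exact Finset.subset_insert _ _))
          (fun z hz => by
            rcases List.mem_cons.1 hz with rfl | hz
            · refine ⟨by rw [hseen']; exact Finset.mem_insert_self _ _, ?_, ?_⟩
              · exact fun hzS => hynS (hS hzS)
              · exact Relation.ReflTransGen.tail hrx hxy
            · obtain ⟨a, b, c⟩ := hstk z hz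
              exact ⟨by rw [hseen']; exact Finset.mem_insert_of_mem a, b, c⟩)
          (fun z hz => by
            rw [hseen'] at hz
            rcases Finset.mem_insert.1 hz with rfl | hz
            · exact Or.inr (Relation.ReflTransGen.tail hrx hxy)
            · exact hsound z hz)
          (fun z hz h1 h2 h3 => by
            rw [hseen'] at hz
            have hzy : z ≠ y := fun h => h2 (h ▸ List.mem_cons_self)
            rcases Finset.mem_insert.1 hz with rfl | hz
            · exact absurd rfl hzy
            · intro w hw
              rw [hseen']
              exact Finset.mem_insert_of_mem
                (hclo z hz h1 (fun hm => h2 (List.mem_cons_of_mem _ hm)) h3 w hw))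
      refine ⟨I1, I2, ?_, I4, I5, I6, ?_, ?_⟩
      · exact (by rw [hseen']; exact Finset.subset_insert _ _ : pvSeen sn ⊆ _).trans I3
      · rw [I7, hseen', Finset.card_insert_of_notMem hynS]
        push_cast [List.length_cons]
        ring
      · intro z hz
        rcases List.mem_cons.1 hz with rfl | hz
        · exact I3 (by rw [hseen']; exact Finset.mem_insert_self _ _)
        · exact I8 z hz

lemma pvLoopB_spec {gb : List (Int × Int)} (hpre : Pre_componentsInGraph gb) {i : Int} :
    ∀ (fuel : Nat) (seen : PySem.Set Int) (stack : List Int) (size : Int) (S : Finset ℤ),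
      seen.Nodup →
      (∀ x ∈ seen, 0 ≤ x ∧ x ≤ 2 * gb.length) →
      S ⊆ pvSeen seen → i ∈ pvSeen seen →
      (∀ x ∈ stack, x ∈ pvSeen seen ∧ x ∉ S ∧ pvReach gb i x) →
      (∀ x ∈ pvSeen seen, x ∈ S ∨ pvReach gb i x) →
      (∀ x ∈ pvSeen seen, x ∉ S → x ∉ stack → ∀ y, pvE gb x y → y ∈ pvSeen seen) →
      size + (stack.length : Int) = (pvSeen seen).card - S.card →
      2 * (2 * gb.length + 1) + stack.length ≤ fuel + 2 * (pvSeen seen).card →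
      (pvLoopB (pvAdjB gb) fuel seen stack size).2.Nodup ∧
      (∀ x ∈ (pvLoopB (pvAdjB gb) fuel seen stack size).2, 0 ≤ x ∧ x ≤ 2 * gb.length) ∧
      PvSat gb S (pvSeen (pvLoopB (pvAdjB gb) fuel seen stack size).2) i
        (pvLoopB (pvAdjB gb) fuel seen stack size).1 := by
  intro fuel
  induction fuel with
  | zero =>
    intro seen stack size S hnd hrg hS hiS hstk hsound hclo hcnt hfuel
    cases stack with
    | nil =>
      exact ⟨hnd, hrg,
        { mono := hS, self := hiS,
          sound := hsound,
          closednew := fun x hx hxn y hy => hclo x hx hxn (by simp) y hy,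
          count := by simpa using hcnt }⟩
    | cons x rest =>
      exfalso
      have hcard : ((pvSeen seen).card : Int) ≤ 2 * (gb.length : Int) + 1 :=
        pvSeen_card_le (by positivity) hrg
      simp only [List.length_cons] at hfuel
      omega
  | succ fuel ihf =>
    intro seen stack size S hnd hrg hS hiS hstk hsound hclo hcnt hfuel
    cases stack with
    | nil =>
      exact ⟨hnd, hrg,
        { mono := hS, self := hiS,
          sound := hsound,
          closednew := fun x hx hxn y hy => hclo x hx hxn (by simp) y hy,
          count := by simpa using hcnt }⟩
    | cons x rest =>
      obtain ⟨hxm, hxS, hxr⟩ := hstk x List.mem_cons_self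
      have hLadj : ∀ y ∈ (pvAdjB gb).getD x [], pvE gb x y := fun y hy => mem_pvAdjB.1 hy
      obtain ⟨F1, F2, F3, F4, F5, F6, F7, F8⟩ :=
        pvLoopB_fold hpre hxr ((pvAdjB gb).getD x []) hLadj seen rest hnd hrg hS
          (fun z hz => hstk z (List.mem_cons_of_mem _ hz)) hsound
          (fun z hz h1 h2 h3 w hw => hclo z hz h1 (by simp [h2, h3]) w hw)
      set st := ((pvAdjB gb).getD x []).foldl pvPush (seen, rest) with hst
      have hres : pvLoopB (pvAdjB gb) (fuel + 1) seen (x :: rest) size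
          = pvLoopB (pvAdjB gb) fuel st.1 st.2 (size + 1) := by
        rfl
      rw [hres]
      have hcard : (pvSeen seen).card ≤ (pvSeen st.1).card := Finset.card_le_card F3
      apply ihf st.1 st.2 (size + 1) S F1 F2 (hS.trans F3) (F3 hiS) F4 F5
      · -- the processed node x is now fully expanded
        intro z hz h1 h2 w hw
        rcases eq_or_ne z x with rfl | hzx
        · exact F8 w (mem_pvAdjB.2 hw)
        · exact F6 z hz h1 h2 hzx w hw
      · -- count
        simp only [List.length_cons] at hcnt
        omega
      · -- fuel
        simp only [List.length_cons] at hfuel hcnt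
        omega

-- ===== the two aggregations agree =====

-- A's running registers over the list of component sizes
def pvAgg (cs : List Int) : Option Int × Int :=
  cs.foldl
    (fun p c => (if c ≥ 2 then pvMinUpd p.1 c else p.1, max p.2 c)) (none, 0)

lemma pvAgg_append (cs : List Int) (c : Int) :
    pvAgg (cs ++ [c]) =
      (if c ≥ 2 then pvMinUpd (pvAgg cs).1 c else (pvAgg cs).1, max (pvAgg cs).2 c) := by
  unfold pvAgg
  rw [List.foldl_append]
  rfl

lemma pvAgg_max (cs : List Int) (hpos : ∀ c ∈ cs, 1 ≤ c) :
    (pvAgg cs).2 = PySem.List.maxD cs (fun x => x) 0 := by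
  have h2 : (pvAgg cs).2 = cs.foldl (fun b c => max b c) 0 := by
    unfold pvAgg
    rw [PySem.List.foldl_prod_mk
      (f := fun p1 c => if c ≥ 2 then pvMinUpd p1 c else p1)
      (g := fun b c => max b c)]
  rw [h2]
  cases cs with
  | nil => rfl
  | cons x t =>
    have hx : max 0 x = x := max_eq_right (by have := hpos x (by simp); omega)
    simp [PySem.List.maxD, PySem.List.max?_id_cons, List.foldl_cons, hx]

lemma pvAgg_min (cs : List Int) :
    (pvAgg cs).1.getD (pvAgg cs).2 =
      PySem.List.minD (cs.filter (fun s => 2 ≤ s)) (fun x => x) (pvAgg cs).2 := by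
  have h1 : (pvAgg cs).1 = cs.foldl (fun p1 c => if c ≥ 2 then pvMinUpd p1 c else p1) none := by
    unfold pvAgg
    rw [PySem.List.foldl_prod_mk
      (f := fun p1 c => if c ≥ 2 then pvMinUpd p1 c else p1)
      (g := fun b c => max b c)]
  have hfil : cs.foldl (fun p1 c => if c ≥ 2 then pvMinUpd p1 c else p1) none
      = (cs.filter (fun s => 2 ≤ s)).foldl pvMinUpd none := by
    rw [PySem.List.foldl_ite_eq_foldl_filter (p := fun c => c ≥ 2)]
  have haux : ∀ (t : List Int) (m : Int),
      t.foldl pvMinUpd (some m) = some (t.foldl min m) := by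
    intro t
    induction t with
    | nil => intro m; rfl
    | cons c t ih => intro m; simpa [pvMinUpd] using ih (min m c)
  rw [h1, hfil]
  cases hL : cs.filter (fun s => 2 ≤ s) with
  | nil => rfl
  | cons x t =>
    rw [List.foldl_cons]
    show (t.foldl _ (some x)).getD _ = _
    rw [haux t x]
    simp [PySem.List.minD, PySem.List.min?_id_cons]

-- ===== the outer loops march in lockstep =====

lemma pvLockstep {gb : List (Int × Int)} (hpre : Pre_componentsInGraph gb) :
    ∀ (R : List Int), (∀ j ∈ R, 1 ≤ j ∧ j ≤ (gb.length : Int) * 2) →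
    ∀ (v : List Bool) (sm : Option Int) (bg : Int) (seen : PySem.Set Int) (sizes : List Int),
    v.length = 2 * gb.length + 1 → pvM v = pvSeen seen → pvClosed gb (pvM v) →
    seen.Nodup → (∀ x ∈ seen, 0 ≤ x ∧ x ≤ 2 * (gb.length : Int)) →
    (sm, bg) = pvAgg sizes → (∀ c ∈ sizes, 1 ≤ c) →
    ((R.foldl (fun (s : List Bool × Option Int × Int) i =>
        if PySem.List.pyGetD s.1 i false = false then
          let r := pvDfsA (pvAdjA gb) (((gb.length : Int) * 2).toNat + 2) s.1 i
          let sm := if r.1 ≥ 2 then pvMinUpd s.2.1 r.1 else s.2.1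
          (r.2, sm, max s.2.2 r.1)
        else s) (v, sm, bg)).2.1,
     (R.foldl (fun (s : List Bool × Option Int × Int) i =>
        if PySem.List.pyGetD s.1 i false = false then
          let r := pvDfsA (pvAdjA gb) (((gb.length : Int) * 2).toNat + 2) s.1 i
          let sm := if r.1 ≥ 2 then pvMinUpd s.2.1 r.1 else s.2.1
          (r.2, sm, max s.2.2 r.1)
        else s) (v, sm, bg)).2.2)
      = pvAgg (R.foldl (fun (s : PySem.Set Int × List Int) i =>
          if PySem.Set.contains s.1 i then s
          else
            let r := pvLoopB (pvAdjB gb) (2 * ((gb.length : Int) * 2).toNat + 4)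
              (PySem.Set.add s.1 i) [i] 0
            (r.2, s.2 ++ [r.1])) (seen, sizes)).2 ∧
    (∀ c ∈ (R.foldl (fun (s : PySem.Set Int × List Int) i =>
          if PySem.Set.contains s.1 i then s
          else
            let r := pvLoopB (pvAdjB gb) (2 * ((gb.length : Int) * 2).toNat + 4)
              (PySem.Set.add s.1 i) [i] 0
            (r.2, s.2 ++ [r.1])) (seen, sizes)).2, 1 ≤ c) := by
  intro R
  induction R with
  | nil =>
    intro _ v sm bg seen sizes _ _ _ _ _ hreg hpos
    exact ⟨hreg, hpos⟩
  | cons i R ihR =>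
    intro hR v sm bg seen sizes hlen hMS hcl hnd hrg hreg hpos
    have hiR : 1 ≤ i ∧ i ≤ (gb.length : Int) * 2 := hR i List.mem_cons_self
    have hi0 : 0 ≤ i := by omega
    have hil : i.toNat < v.length := by omega
    rw [List.foldl_cons, List.foldl_cons]
    by_cases hiv : i ∈ pvM v
    · -- both skip
      have hA : ¬ (PySem.List.pyGetD v i false = false) := by
        rw [pvGetD_false_iff hi0 hil]; exact fun h => h hiv
      have hB : PySem.Set.contains seen i = true :=
        (PySem.Set.contains_iff _ _).2 (mem_pvSeen.1 (hMS ▸ hiv))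
      rw [if_neg hA, if_pos hB]
      exact ihR (fun j hj => hR j (List.mem_cons_of_mem _ hj)) v sm bg seen sizes
        hlen hMS hcl hnd hrg hreg hpos
    · -- both explore the component of i
      have hA : PySem.List.pyGetD v i false = false := (pvGetD_false_iff hi0 hil).2 hiv
      have hB : ¬ (PySem.Set.contains seen i = true) := by
        intro h
        exact hiv (hMS ▸ (mem_pvSeen.2 ((PySem.Set.contains_iff _ _).1 h)))
      rw [if_pos hA, if_neg hB]
      -- the DFS of A
      obtain ⟨hlenA, satA⟩ := pvDfsA_spec hpre (((gb.length : Int) * 2).toNat + 2) v i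
        hlen hi0 hil hiv (by omega)
      set rA := pvDfsA (pvAdjA gb) (((gb.length : Int) * 2).toNat + 2) v i with hrA
      -- the worklist of B
      have hseen1 : pvSeen (PySem.Set.add seen i) = insert i (pvM v) := by
        rw [pvSeen_add, hMS]
      have hiSv : i ∉ pvSeen seen := fun h => hiv (hMS ▸ h)
      obtain ⟨hndB, hrgB, satB⟩ := pvLoopB_spec hpre (2 * ((gb.length : Int) * 2).toNat + 4)
        (PySem.Set.add seen i) [i] 0 (pvM v)
        (PySem.Set.nodup_add seen i hnd)
        (fun z hz => by
          rcases (PySem.Set.mem_add seen i z).1 hz with hz | rfl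
          · exact hrg z hz
          · constructor <;> omega)
        (by rw [hseen1]; exact Finset.subset_insert _ _)
        (by rw [hseen1]; exact Finset.mem_insert_self _ _)
        (fun z hz => by
          rcases List.mem_cons.1 hz with rfl | hz
          · exact ⟨by rw [hseen1]; exact Finset.mem_insert_self _ _, hiv,
              Relation.ReflTransGen.refl⟩
          · exact absurd hz (List.not_mem_nil))
        (fun z hz => by
          rw [hseen1] at hz
          rcases Finset.mem_insert.1 hz with rfl | hz
          · exact Or.inr Relation.ReflTransGen.refl
          · exact Or.inl hz)
        (fun z hz h1 h2 y hy => by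
          rw [hseen1] at hz
          rcases Finset.mem_insert.1 hz with rfl | hz
          · exact absurd List.mem_cons_self h2
          · rw [hseen1]
            exact Finset.mem_insert_of_mem (hcl z hz y hy))
        (by
          rw [hseen1, Finset.card_insert_of_notMem hiv]
          simp)
        (by
          have : i ∈ pvSeen (PySem.Set.add seen i) := by
            rw [hseen1]; exact Finset.mem_insert_self _ _
          have hcard := Finset.card_pos.2 ⟨i, this⟩
          simp only [List.length_singleton]
          omega)
      set rB := pvLoopB (pvAdjB gb) (2 * ((gb.length : Int) * 2).toNat + 4)
        (PySem.Set.add seen i) [i] 0 with hrB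
      -- the two saturation sets coincide
      have hTfullA : ∀ x ∈ pvM rA.2, ∀ y, pvE gb x y → y ∈ pvM rA.2 := by
        intro x hx y hy
        by_cases hxS : x ∈ pvM v
        · exact satA.mono (hcl x hxS y hy)
        · exact satA.closednew x hx hxS y hy
      have hTfullB : ∀ x ∈ pvSeen rB.2, ∀ y, pvE gb x y → y ∈ pvSeen rB.2 := by
        intro x hx y hy
        by_cases hxS : x ∈ pvM v
        · exact satB.mono (hcl x hxS y hy)
        · exact satB.closednew x hx hxS y hy
      have hT : pvM rA.2 = pvSeen rB.2 :=
        pvUniq satA.mono satA.self hTfullA satA.sound satB.mono satB.self hTfullB satB.sound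
      have hc : rA.1 = rB.1 := by rw [satA.count, satB.count, hT]
      have hc1 : 1 ≤ rA.1 := by
        rw [satA.count]
        have hsub : pvM v ⊂ pvM rA.2 := Finset.ssubset_iff_of_subset satA.mono
          |>.2 ⟨i, satA.self, hiv⟩
        have := Finset.card_lt_card hsub
        omega
      -- reassemble and recurse
      have hstep := ihR (fun j hj => hR j (List.mem_cons_of_mem _ hj))
        rA.2 (if rA.1 ≥ 2 then pvMinUpd sm rA.1 else sm) (max bg rA.1)
        rB.2 (sizes ++ [rB.1])
        (by rw [hlenA, hlen]) (by rw [hT]) (fun x hx y hy => hT ▸ hTfullA x (hT ▸ hx) y hy)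
        hndB hrgB
        (by rw [pvAgg_append, ← hreg, ← hc])
        (fun c hcm => by
          rcases List.mem_append.1 hcm with h | h
          · exact hpos c h
          · rw [List.mem_singleton.1 h, ← hc]; exact hc1)
      exact hstep

-- turning matching registers into A's and B's final answers
lemma pvFinal (sm : Option Int) (bg : Int) (cs : List Int)
    (hreg : (sm, bg) = pvAgg cs) (hpos : ∀ c ∈ cs, 1 ≤ c) :
    [sm.getD bg, bg] =
      [PySem.List.minD (cs.filter (fun s => 2 ≤ s)) (fun x => x)
         (PySem.List.maxD cs (fun x => x) 0),
       PySem.List.maxD cs (fun x => x) 0] := by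
  rw [Prod.mk.injEq] at hreg
  obtain ⟨h1, h2⟩ := hreg
  have hmax := pvAgg_max cs hpos
  have hmin := pvAgg_min cs
  rw [h1, h2, ← hmax]
  rw [hmin]

theorem componentsInGraph_spec : Claim_equal_componentsInGraph := by
  intro gb _ hpre
  unfold Spec_componentsInGraph componentsInGraph componentsInGraph_alt
  dsimp only
  have hrng : ∀ j ∈ PySem.List.pyRange 1 ((gb.length : Int) * 2 + 1) 1,
      1 ≤ j ∧ j ≤ (gb.length : Int) * 2 := by
    intro j hj
    have := PySem.List.mem_pyRange_one.1 hj
    omega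
  obtain ⟨hreg, hpos⟩ := pvLockstep hpre (PySem.List.pyRange 1 ((gb.length : Int) * 2 + 1) 1)
    hrng (List.replicate ((gb.length : Int) * 2 + 1).toNat false) none 0 PySem.Set.empty []
    (by rw [List.length_replicate]; omega)
    (by rw [pvM_replicate]; rfl)
    (by rw [pvM_replicate]; exact fun x hx => absurd hx (Finset.notMem_empty x))
    List.nodup_nil
    (fun x hx => absurd hx List.not_mem_nil)
    rfl
    (fun c hc => absurd hc List.not_mem_nil)
  exact pvFinal _ _ _ hreg hpos
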